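-- pv_equiv track=rewrite | github.com/ALTA-DE1-Nurul-Kholifah-13Jul1998/Basic-Programming-Part4 | problem2/main.py | draw_xyz
-- ===== SOURCE A (Python) =====
-- def draw_xyz(N):
--     pattern = ""
--     pola = ["X","Y","Z"]
--
--     for i in range(1, (N * N) + 1):
--         if i%3==0:
--             pattern+=pola[0] + " "
--         elif i%2!=0:
--             pattern+=pola[1] + " "
--         elif i%2==0:
--             pattern+=pola[2] + " "
--         if i%N==0:
--             pattern+="\n"
--     return pattern
-- ===== SOURCE B (Python) =====
-- def draw_xyz(N):
--     cycle = "YZXZYX"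
--     rows = []
--     for r in range(N):
--         row = "".join(cycle[(r * N + c) % 6] + " " for c in range(N))
--         rows.append(row + "\n")
--     return "".join(rows)
-- ===== Notes on version B (the rewrite author's own statement) =====
-- stated objective: simpler
-- what changed: B builds the grid row by row, reading each character directly from the closed period-6 cycle 'YZXZYX' and joining the pieces, instead of accumulating one character at a time through a mod-3/parity branch cascade; Pre_ restricts to N >= 0, the natural domain of a grid size (for negative N, A still draws an |N|x|N| grid only because N*N and Python's modulo happen to work out).
-- outside the precondition, e.g. on draw_xyz(-2): A returns 'Y Z \nX Z \n', B returns ''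
import Mathlib
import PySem

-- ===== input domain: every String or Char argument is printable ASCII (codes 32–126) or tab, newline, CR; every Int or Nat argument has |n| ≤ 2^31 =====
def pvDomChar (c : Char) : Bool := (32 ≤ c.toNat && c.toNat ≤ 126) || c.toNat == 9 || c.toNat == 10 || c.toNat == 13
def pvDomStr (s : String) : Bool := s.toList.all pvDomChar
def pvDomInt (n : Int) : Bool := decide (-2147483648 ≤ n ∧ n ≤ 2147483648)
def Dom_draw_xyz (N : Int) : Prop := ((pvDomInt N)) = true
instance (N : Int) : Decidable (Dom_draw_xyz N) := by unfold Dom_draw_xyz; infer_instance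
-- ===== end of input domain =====

-- B builds the grid row by row from the closed period-6 character cycle "YZXZYX" instead of
-- accumulating one character at a time through a parity/mod-3 branch cascade (objective: simpler).

-- ===== PORT A =====
def draw_xyz (N : Int) : String :=
  let pola : List String := ["X", "Y", "Z"]
  (PySem.List.pyRange 1 (N * N + 1) 1).foldl
    (fun pattern i =>
      let pattern :=
        if PySem.Int.mod i 3 = 0 then pattern ++ PySem.List.pyGetD pola 0 "" ++ " "
        else if ¬ (PySem.Int.mod i 2 = 0) then pattern ++ PySem.List.pyGetD pola 1 "" ++ " "
        else if PySem.Int.mod i 2 = 0 then pattern ++ PySem.List.pyGetD pola 2 "" ++ " "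
        else pattern
      if PySem.Int.mod i N = 0 then pattern ++ "\n" else pattern)
    ""

-- ===== PORT B =====
def draw_xyz_alt (N : Int) : String :=
  let cycle : String := "YZXZYX"
  let rows : List String := (PySem.List.pyRange 0 N 1).map (fun r =>
    let row : String := PySem.Str.join "" ((PySem.List.pyRange 0 N 1).map (fun c =>
      String.ofList [(PySem.Str.pyGet? cycle (PySem.Int.mod (r * N + c) 6)).getD ' ', ' ']))
    row ++ "\n")
  PySem.Str.join "" rows

-- ===== PRECONDITION & SPEC =====
-- Pre_ restricts to N ≥ 0, the natural domain of a grid size; for negative N, A still returns an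
-- |N|×|N| grid only as an accident of N*N and Python's modulo, while B naturally returns "".
def Pre_draw_xyz (N : Int) : Prop := 0 ≤ N
instance (N : Int) : Decidable (Pre_draw_xyz N) := by unfold Pre_draw_xyz; infer_instance
def pvWitness_draw_xyz : Int := (3)

def Spec_draw_xyz (N : Int) (out : String) : Prop := out = draw_xyz_alt N
instance (N : Int) (out : String) : Decidable (Spec_draw_xyz N out) := by unfold Spec_draw_xyz; infer_instance

-- ===== CLAIM (what is proved, stated in full; the proofs are below) =====
def Claim_equal_draw_xyz : Prop := ∀ (N : Int), Dom_draw_xyz N → Pre_draw_xyz N → Spec_draw_xyz N (draw_xyz N)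

-- ===== LEMMAS AND PROOFS =====

-- per-index piece of A's loop body, on the char-list level
def fAL (N : Int) (i : Int) : List Char :=
  (if PySem.Int.mod i 3 = 0 then ['X', ' ']
   else if ¬ (PySem.Int.mod i 2 = 0) then ['Y', ' ']
   else ['Z', ' ']) ++ (if PySem.Int.mod i N = 0 then ['\n'] else [])

-- B's cycle lookup on the Nat level
def cyc (j : Nat) : Char := ("YZXZYX".toList)[j]?.getD ' '

-- B's row on the char-list level
def rowL (m : Nat) (r : Nat) : List Char :=
  ((List.range m).map (fun c => [cyc ((r * m + c) % 6), ' '])).flatten ++ ['\n']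

lemma join_empty (l : List (List Char)) : PySem.Chars.join [] l = l.flatten := by
  show List.intercalate [] l = _
  induction l with
  | nil => rfl
  | cons x xs ih =>
    cases xs with
    | nil => simp [List.intercalate]
    | cons y ys =>
      simp [List.intercalate] at ih ⊢
      simpa using ih

lemma joinStr_toList (parts : List String) :
    (PySem.Str.join "" parts).toList = (parts.map String.toList).flatten := by
  rw [PySem.Str.toList_join]
  exact join_empty _

lemma foldl_str (f : Int → List Char) (g : String → Int → String)
    (hg : ∀ acc i, g acc i = acc ++ String.ofList (f i)) :
    ∀ (l : List Int) (acc : String),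
      (l.foldl g acc).toList = acc.toList ++ (l.map f).flatten := by
  intro l
  induction l with
  | nil => intro acc; simp
  | cons i l ih =>
    intro acc
    rw [List.foldl_cons, hg, ih]
    simp

lemma stepA (N : Int) (acc : String) (i : Int) :
    (let pattern :=
      if PySem.Int.mod i 3 = 0 then acc ++ PySem.List.pyGetD ["X", "Y", "Z"] 0 "" ++ " "
      else if ¬ (PySem.Int.mod i 2 = 0) then acc ++ PySem.List.pyGetD ["X", "Y", "Z"] 1 "" ++ " "
      else if PySem.Int.mod i 2 = 0 then acc ++ PySem.List.pyGetD ["X", "Y", "Z"] 2 "" ++ " "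
      else acc
     if PySem.Int.mod i N = 0 then pattern ++ "\n" else pattern) = acc ++ String.ofList (fAL N i) := by
  show (if PySem.Int.mod i N = 0 then _ ++ "\n" else _) = _
  simp only [fAL]
  split_ifs <;> apply String.ext <;> simp <;> rfl

lemma charPart (n : Nat) (h : 1 ≤ n) :
    (if (n % 3 : Nat) = 0 then (['X', ' '] : List Char)
     else if ¬ ((n % 2 : Nat) = 0) then ['Y', ' '] else ['Z', ' ']) = [cyc ((n - 1) % 6), ' '] := by
  have h3 : n % 3 = ((n - 1) % 6 + 1) % 3 := by omega
  have h2 : n % 2 = ((n - 1) % 6 + 1) % 2 := by omega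
  have h6 : (n - 1) % 6 < 6 := Nat.mod_lt _ (by norm_num)
  set j := (n - 1) % 6 with hj
  clear_value j
  interval_cases j <;> rw [h3, h2] <;> decide

lemma nlPart (N : Int) (m r c : Nat) (hm : m = N.natAbs) (hc : c < m) :
    (PySem.Int.mod ((r * m + c + 1 : Nat) : Int) N = 0) ↔ c + 1 = m := by
  rw [PySem.Int.mod_eq_zero_iff_dvd]
  have hiff : N ∣ ((r * m + c + 1 : Nat) : Int) ↔ (m : Nat) ∣ (r * m + c + 1) := by
    rw [hm, ← Int.natCast_dvd_natCast, Int.natAbs_dvd]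
  rw [hiff]
  constructor
  · intro hd
    have hd' : m ∣ c + 1 :=
      (Nat.dvd_add_right (dvd_mul_left m r)).mp (by rwa [Nat.add_assoc] at hd)
    have := Nat.le_of_dvd (by omega) hd'
    omega
  · intro hce
    have he : r * m + c + 1 = m * (r + 1) := by
      rw [Nat.mul_add, Nat.mul_one, Nat.mul_comm]; omega
    exact ⟨r + 1, he⟩

lemma fAL_nat (N : Int) (m r c : Nat) (hm : m = N.natAbs) (hc : c < m) :
    fAL N ((r * m + c + 1 : Nat) : Int) =
      [cyc ((r * m + c) % 6), ' '] ++ (if c + 1 = m then ['\n'] else []) := by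
  unfold fAL
  have e3 : PySem.Int.mod ((r * m + c + 1 : Nat) : Int) 3 = (((r * m + c + 1) % 3 : Nat) : Int) := by
    exact_mod_cast PySem.Int.mod_natCast (r * m + c + 1) 3
  have e2 : PySem.Int.mod ((r * m + c + 1 : Nat) : Int) 2 = (((r * m + c + 1) % 2 : Nat) : Int) := by
    exact_mod_cast PySem.Int.mod_natCast (r * m + c + 1) 2
  rw [e3, e2]
  have hnl := nlPart N m r c hm hc
  have hcp := charPart (r * m + c + 1) (by omega)
  rw [show r * m + c + 1 - 1 = r * m + c by omega] at hcp
  simp only [Nat.cast_eq_zero]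
  rw [hcp]
  congr 1
  exact if_congr hnl rfl rfl

lemma row_eq (N : Int) (m r : Nat) (hm : m = N.natAbs) (hN : N ≠ 0) :
    ((List.range m).map (fun c => fAL N ((r * m + c + 1 : Nat) : Int))).flatten = rowL m r := by
  have hm0 : 0 < m := hm ▸ Int.natAbs_pos.mpr hN
  obtain ⟨k, rfl⟩ : ∃ k, m = k + 1 := ⟨m - 1, by omega⟩
  unfold rowL
  rw [List.range_succ]
  simp only [List.map_append, List.flatten_append, List.map_cons, List.map_nil,
    List.flatten_cons, List.flatten_nil]
  have hmap : (List.range k).map (fun c => fAL N ((r * (k + 1) + c + 1 : Nat) : Int))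
      = (List.range k).map (fun c => [cyc ((r * (k + 1) + c) % 6), ' ']) := by
    apply List.map_congr_left
    intro c hc
    simp only [List.mem_range] at hc
    rw [fAL_nat N (k + 1) r c hm (by omega)]
    simp only [if_neg (show ¬ (c + 1 = k + 1) from by omega), List.append_nil]
  rw [hmap, fAL_nat N (k + 1) r k hm (by omega)]
  simp

lemma main_rows (N : Int) (m : Nat) (hm : m = N.natAbs) (hN : N ≠ 0) : ∀ r : Nat,
    ((List.range (r * m)).map (fun k => fAL N ((k + 1 : Nat) : Int))).flatten =
      ((List.range r).map (rowL m)).flatten := by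
  intro r
  induction r with
  | zero => simp
  | succ r ih =>
    rw [Nat.succ_mul, List.range_add, List.range_succ]
    simp only [List.map_append, List.flatten_append, ih, List.map_map, List.map_cons,
      List.map_nil, List.flatten_cons, List.flatten_nil]
    rw [show ((List.range m).map ((fun k => fAL N ((k + 1 : Nat) : Int)) ∘ (fun x => r * m + x)))
        = (List.range m).map (fun c => fAL N ((r * m + c + 1 : Nat) : Int)) from rfl]
    rw [row_eq N m r hm hN]
    simp

lemma B_toList (m : Nat) :
    (draw_xyz_alt ((m : Nat) : Int)).toList = ((List.range m).map (rowL m)).flatten := by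
  unfold draw_xyz_alt
  rw [joinStr_toList, PySem.List.pyRange_zero_nat]
  simp only [List.map_map]
  congr 1
  apply List.map_congr_left
  intro r hr
  simp only [List.mem_range] at hr
  show (PySem.Str.join "" _ ++ "\n").toList = rowL m r
  rw [String.toList_append, joinStr_toList]
  unfold rowL
  congr 1
  · congr 1
    simp only [List.map_map]
    apply List.map_congr_left
    intro c hc
    simp only [List.mem_range] at hc
    show (String.ofList _).toList = _
    have em : PySem.Int.mod ((r : Int) * (m : Int) + (c : Int)) 6 = (((r * m + c) % 6 : Nat) : Int) := by
      have := PySem.Int.mod_natCast (r * m + c) 6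
      push_cast at this ⊢
      exact this
    rw [em, PySem.Str.pyGet?_eq, PySem.Chars.pyGet?_eq_listPyGet?, PySem.List.pyGet?_natCast]
    simp [cyc]

lemma A_toList (N : Int) :
    (draw_xyz N).toList = ((List.range (N.natAbs * N.natAbs)).map (fun k => fAL N ((k + 1 : Nat) : Int))).flatten := by
  unfold draw_xyz
  rw [foldl_str (fAL N) _ (fun acc i => stepA N acc i)]
  rw [PySem.List.pyRange_one]
  have hsq : N * N + 1 - 1 = ((N.natAbs * N.natAbs : Nat) : Int) := by
    rw [Nat.cast_mul, Int.natAbs_mul_self']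
    ring
  rw [hsq, Int.toNat_natCast]
  simp only [List.map_map]
  show [] ++ _ = _
  rw [List.nil_append]
  congr 1
  apply List.map_congr_left
  intro k hk
  show fAL N (1 + (k : Int)) = _
  congr 1
  push_cast
  ring

-- ===== VERDICT (by name: the statement is the Claim_ definition above) =====
theorem draw_xyz_spec : Claim_equal_draw_xyz := by
  intro N _ hPre
  have h0 : (0 : Int) ≤ N := hPre
  obtain ⟨m, rfl⟩ := Int.eq_ofNat_of_zero_le h0
  unfold Spec_draw_xyz
  rw [← String.toList_inj]
  by_cases hm : m = 0
  · subst hm; decide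
  · rw [A_toList, B_toList m, Int.natAbs_natCast]
    exact main_rows ((m : Nat) : Int) m (Int.natAbs_natCast m).symm (by exact_mod_cast hm) m
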